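-- pv_equiv track=rewrite | github.com/Emaisty/Tetris-AI | find_landings.py | land
-- ===== SOURCE A (Python) =====
-- from copy import deepcopy
--
-- def check_collision(field, piece, piece_pos):
--     for i in range(4):
--         for j in range(4):
--             if piece[i][j]:
--                 if (i + piece_pos[0] >= len(field)) or (j + piece_pos[1] >= len(field[0])) or (i + piece_pos[0] < 0) or\
--                         (j + piece_pos[1] < 0) or field[i + piece_pos[0]][j + piece_pos[1]]:
--                     return True
--     return False
--
-- def land(field, piece, pos_now):
--     res = deepcopy(field)
--     while not check_collision(res, piece, pos_now):
--         pos_now[0] += 1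
--     if pos_now[0] == 0:
--         return None
--     pos_now[0] -= 1
--     for i in range(4):
--         for j in range(4):
--             if i + pos_now[0] < len(field) and j + pos_now[1] < len(field[0]):
--                 res[i + pos_now[0]][j + pos_now[1]] += piece[i][j]
--     return res
-- ===== SOURCE B (Python) =====
-- from copy import deepcopy
--
-- def _first_stop(field, piece, start, left, H, W):
--     stop = None  # smallest colliding vertical position over the filled piece cells
--     for i in range(4):
--         for j in range(4):
--             if piece[i][j]:
--                 c = j + left
--                 if c < 0 or c >= W or i + start < 0:
--                     p = start
--                 else:
--                     p = start
--                     while i + p < H and not field[i + p][c]: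
--                         p += 1
--                 if stop is None or p < stop:
--                     stop = p
--                 if stop == start:
--                     return stop  # this cell cannot move down at all: no later cell can lower the minimum
--     return stop
--
-- def land(field, piece, pos_now):
--     H, W = len(field), len(field[0])
--     start, left = pos_now[0], pos_now[1]
--     stop = _first_stop(field, piece, start, left, H, W)
--     if stop == 0:
--         pos_now[0] = 0
--         return None
--     pos_now[0] = stop - 1
--     res = deepcopy(field)
--     for i in range(4):
--         for j in range(4):
--             if i + pos_now[0] < H and j + left < W:
--                 res[i + pos_now[0]][j + left] += piece[i][j]
--     return res
-- ===== Notes on version B (the rewrite author's own statement) =====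
-- stated objective: alternative
-- what changed: Instead of re-running the full 4x4 collision test at every one-row drop step, B scans each filled piece cell's field column once downward to its first obstruction (breaking out as soon as a cell cannot drop at all) and takes the minimum stop position over the filled cells; the final bounded stamping pass is the same as A's.
-- outside the precondition, e.g. on land([], [[9]], [58, 0]): A returns [], B raises IndexError
import Mathlib
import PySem

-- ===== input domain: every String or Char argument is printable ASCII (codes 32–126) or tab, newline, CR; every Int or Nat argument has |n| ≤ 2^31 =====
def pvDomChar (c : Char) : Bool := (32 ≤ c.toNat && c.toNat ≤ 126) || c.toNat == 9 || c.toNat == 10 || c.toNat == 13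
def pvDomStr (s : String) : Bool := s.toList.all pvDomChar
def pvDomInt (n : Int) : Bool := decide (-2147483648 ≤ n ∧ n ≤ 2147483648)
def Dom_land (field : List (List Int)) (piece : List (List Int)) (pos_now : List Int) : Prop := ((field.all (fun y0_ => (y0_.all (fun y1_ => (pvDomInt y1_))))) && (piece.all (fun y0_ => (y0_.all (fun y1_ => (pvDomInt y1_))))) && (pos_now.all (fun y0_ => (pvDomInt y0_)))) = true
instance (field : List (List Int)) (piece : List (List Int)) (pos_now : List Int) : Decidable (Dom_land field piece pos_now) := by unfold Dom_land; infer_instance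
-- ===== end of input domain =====

-- B finds the landing row by one downward scan per filled piece cell (minimum stop position, with an
-- early exit once a cell cannot move at all) instead of re-running the full 4x4 collision test at every
-- drop step; equivalence is about the RETURN value only (both Pythons also assign the landing row to
-- pos_now[0] in place; inside Pre_ they assign the same value).

-- shared primitive: 'res[r][c] += v' on a 2D list with Python's signed indexing (negative wraps), used
-- by both stamping loops; an index out of range is a no-op here (Python raises there: outside Pre_)
def bump (m : List (List Int)) (r c : Int) (v : Int) : List (List Int) :=
  m.modify (if r < 0 then r + (m.length : Int) else r).toNat
    (fun row => row.modify (if c < 0 then c + (row.length : Int) else c).toNat (fun x => x + v))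

-- the 16 piece cells scanned by both 4x4 loops, in scan order
def pvCells : List (Nat × Nat) :=
  [(0,0),(0,1),(0,2),(0,3),(1,0),(1,1),(1,2),(1,3),(2,0),(2,1),(2,2),(2,3),(3,0),(3,1),(3,2),(3,3)]

-- ===== PORT A =====
def checkCollision (field : List (List Int)) (piece : List (List Int)) (piecePos : List Int) : Bool :=
  (List.range 4).any (fun i => (List.range 4).any (fun j =>
    ((piece.getD i []).getD j 0 != 0) &&
    (decide ((i : Int) + piecePos.getD 0 0 ≥ (field.length : Int)) ||
     decide ((j : Int) + piecePos.getD 1 0 ≥ ((field.getD 0 []).length : Int)) ||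
     decide ((i : Int) + piecePos.getD 0 0 < 0) ||
     decide ((j : Int) + piecePos.getD 1 0 < 0) ||
     ((field.getD ((i : Int) + piecePos.getD 0 0).toNat []).getD ((j : Int) + piecePos.getD 1 0).toNat 0 != 0))))

-- the 'while not check_collision: pos_now[0] += 1' loop, fueled (fuel is always sufficient inside Pre_)
def landLoop (field : List (List Int)) (piece : List (List Int)) (pos1 : Int) : Int → Nat → Int
  | pos0, 0 => pos0
  | pos0, fuel + 1 =>
    if checkCollision field piece [pos0, pos1] then pos0
    else landLoop field piece pos1 (pos0 + 1) fuel

def land (field : List (List Int)) (piece : List (List Int)) (pos_now : List Int) : Option (List (List Int)) :=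
  let res := field   -- deepcopy
  let c := landLoop res piece (pos_now.getD 1 0) (pos_now.getD 0 0)
             (((field.length : Int) + 1 - pos_now.getD 0 0).toNat + 1)
  if c = 0 then none
  else
    let p0 := c - 1
    some ((List.range 4).foldl (fun acc (i : Nat) => (List.range 4).foldl (fun acc (j : Nat) =>
      if decide ((i : Int) + p0 < (field.length : Int)) && decide ((j : Int) + pos_now.getD 1 0 < ((field.getD 0 []).length : Int))
      then bump acc ((i : Int) + p0) ((j : Int) + pos_now.getD 1 0) ((piece.getD i []).getD j 0)
      else acc) acc) res)

-- ===== PORT B =====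
-- the inner 'while i + p < H and not field[i + p][c]: p += 1' scan of Source B, fueled (fuel = H - (i+start) suffices)
def colFirst (field : List (List Int)) (i : Nat) (c : Int) : Int → Nat → Int
  | p, 0 => p
  | p, fuel + 1 =>
    if decide ((i : Int) + p < (field.length : Int)) && ((field.getD ((i : Int) + p).toNat []).getD c.toNat 0 == 0)
    then colFirst field i c (p + 1) fuel
    else p

-- first colliding vertical position ≥ start for piece cell (i,j) (the body computing 'p' in _first_stop)
def cellDrop (field : List (List Int)) (start left : Int) (i j : Nat) : Int :=
  let c : Int := (j : Int) + left
  if decide (c < 0) || decide (c ≥ ((field.getD 0 []).length : Int)) || decide ((i : Int) + start < 0) then start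
  else colFirst field i c start (((field.length : Int) - ((i : Int) + start)).toNat)

-- Source B's _first_stop: the nested 'for' over the 4x4 cells with the 'return stop' early exit
def stopScan (field piece : List (List Int)) (start left : Int) : List (Nat × Nat) → Option Int → Option Int
  | [], s => s
  | x :: rest, s =>
    if (piece.getD x.1 []).getD x.2 0 != 0 then
      let p := cellDrop field start left x.1 x.2
      let s' : Option Int := match s with
        | none => some p
        | some q => some (if p < q then p else q)
      if s' = some start then s'
      else stopScan field piece start left rest s'
    else stopScan field piece start left rest s

def land_alt (field : List (List Int)) (piece : List (List Int)) (pos_now : List Int) : Option (List (List Int)) :=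
  let start := pos_now.getD 0 0
  let left := pos_now.getD 1 0
  match stopScan field piece start left pvCells none with
  | none => none   -- Source B raises TypeError here (no nonzero piece cell); outside Pre_
  | some st =>
    if st = 0 then none
    else
      let p0 := st - 1
      some ((List.range 4).foldl (fun acc (i : Nat) => (List.range 4).foldl (fun acc (j : Nat) =>
        if decide ((i : Int) + p0 < (field.length : Int)) && decide ((j : Int) + left < ((field.getD 0 []).length : Int))
        then bump acc ((i : Int) + p0) ((j : Int) + left) ((piece.getD i []).getD j 0)
        else acc) acc) field)

-- ===== PRECONDITION & SPEC =====
-- collision condition of check_collision for one piece cell (i,j) at vertical position p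
def bad (field : List (List Int)) (left : Int) (i j : Nat) (p : Int) : Bool :=
  decide ((i : Int) + p ≥ (field.length : Int)) ||
  decide ((j : Int) + left ≥ ((field.getD 0 []).length : Int)) ||
  decide ((i : Int) + p < 0) ||
  decide ((j : Int) + left < 0) ||
  ((field.getD ((i : Int) + p).toNat []).getD ((j : Int) + left).toNat 0 != 0)

-- the piece entry (i,j) exists (Python reads piece[i][j] without raising)
def exAt (piece : List (List Int)) (i j : Nat) : Prop :=
  i < piece.length ∧ j < (piece.getD i []).length

-- the field read made when check_collision tests cell (i,j) at position start stays inside its row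
def readSafe0 (field : List (List Int)) (start left : Int) (i j : Nat) : Prop :=
  (0 ≤ (i : Int) + start ∧ (i : Int) + start < (field.length : Int) ∧
   0 ≤ (j : Int) + left ∧ (j : Int) + left < ((field.getD 0 []).length : Int)) →
  (j : Int) + left < ((field.getD ((i : Int) + start).toNat []).length : Int)

-- Source B's downward column scan for cell (i,j) stays inside every row it may visit
def colSafe (field : List (List Int)) (start left : Int) (i j : Nat) : Prop :=
  ∀ rr < field.length, (i : Int) + start ≤ (rr : Int) →
    (j : Int) + left < ((field.getD rr []).length : Int)

-- the stamping access for cell (i,j) at landing row start-1 exists and is a legal (possibly negative) index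
def stampCellOk (field piece : List (List Int)) (start left : Int) (i j : Nat) : Prop :=
  ((i : Int) + (start - 1) < (field.length : Int) ∧ (j : Int) + left < ((field.getD 0 []).length : Int)) →
  (exAt piece i j ∧ -(field.length : Int) ≤ (i : Int) + (start - 1) ∧
   (0 ≤ (j : Int) + left →
     (j : Int) + left < ((field.getD ((if (i : Int) + (start - 1) < 0 then (i : Int) + (start - 1) + (field.length : Int) else (i : Int) + (start - 1)).toNat) []).length : Int)) ∧
   ((j : Int) + left < 0 →
     -((j : Int) + left) ≤ ((field.getD ((if (i : Int) + (start - 1) < 0 then (i : Int) + (start - 1) + (field.length : Int) else (i : Int) + (start - 1)).toNat) []).length : Int)))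

-- lexicographic 'earlier in the 4x4 scan' order
def lexLt (y x : Nat × Nat) : Prop := y.1 < x.1 ∨ (y.1 = x.1 ∧ y.2 < x.2)

-- Pre_ keeps exactly two certified regimes of the Python's behaviour: 'Full' (a complete 4x4 piece, a
-- rectangular field and a start position whose stamping indices never leave Python's legal signed range)
-- and 'Immediate' (the scan hits, at its first nonzero cell, a collision already at the start position,
-- every cell read before that point existing, so the piece does not move).  A raises or loops forever on
-- the excluded malformed shapes; additionally (see claim.json cites) Pre_ excludes an empty field and some
-- immediate-collision inputs with out-of-window piece reads on which A still returns by short-circuiting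
-- where B's single-pass scan reads (and so raises) — both defensible corners of malformed input.
def Pre_land (field : List (List Int)) (piece : List (List Int)) (pos_now : List Int) : Prop :=
  2 ≤ pos_now.length ∧
  field ≠ [] ∧
  (∃ x ∈ pvCells, (piece.getD x.1 []).getD x.2 0 ≠ 0) ∧
  (((4 ≤ piece.length ∧ (∀ i < 4, 4 ≤ (piece.getD i []).length)) ∧
    1 - (field.length : Int) ≤ pos_now.getD 0 0 ∧
    -((field.getD 0 []).length : Int) ≤ pos_now.getD 1 0 ∧
    (∀ row ∈ field, (field.getD 0 []).length ≤ row.length))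
   ∨
   ((∃ x ∈ pvCells,
      (exAt piece x.1 x.2 ∧ (piece.getD x.1 []).getD x.2 0 ≠ 0 ∧
       readSafe0 field (pos_now.getD 0 0) (pos_now.getD 1 0) x.1 x.2 ∧
       bad field (pos_now.getD 1 0) x.1 x.2 (pos_now.getD 0 0) = true) ∧
      (∀ y ∈ pvCells, lexLt y x →
        exAt piece y.1 y.2 ∧ readSafe0 field (pos_now.getD 0 0) (pos_now.getD 1 0) y.1 y.2 ∧
        ((piece.getD y.1 []).getD y.2 0 = 0 ∨
         (bad field (pos_now.getD 1 0) y.1 y.2 (pos_now.getD 0 0) = false ∧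
          colSafe field (pos_now.getD 0 0) (pos_now.getD 1 0) y.1 y.2)))) ∧
    (pos_now.getD 0 0 = 0 ∨
     ∀ x ∈ pvCells, stampCellOk field piece (pos_now.getD 0 0) (pos_now.getD 1 0) x.1 x.2)))
instance (field : List (List Int)) (piece : List (List Int)) (pos_now : List Int) : Decidable (Pre_land field piece pos_now) := by unfold Pre_land stampCellOk exAt readSafe0 colSafe lexLt; infer_instance

def pvWitness_land : List (List Int) × List (List Int) × List Int :=
  ([[0, 0, 0], [0, 0, 0], [1, 0, 0]],
   [[0, 0, 0, 0], [1, 1, 0, 0], [0, 1, 0, 0], [0, 0, 0, 0]],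
   [0, 1])

def Spec_land (field : List (List Int)) (piece : List (List Int)) (pos_now : List Int) (out : Option (List (List Int))) : Prop := out = land_alt field piece pos_now
instance (field : List (List Int)) (piece : List (List Int)) (pos_now : List Int) (out : Option (List (List Int))) : Decidable (Spec_land field piece pos_now out) := by unfold Spec_land; infer_instance

-- ===== CLAIM (what is proved, stated in full; the proofs are below) =====
def Claim_equal_land : Prop := ∀ (field : List (List Int)) (piece : List (List Int)) (pos_now : List Int), Dom_land field piece pos_now → Pre_land field piece pos_now → Spec_land field piece pos_now (land field piece pos_now)

-- ===== LEMMAS AND PROOFS =====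

lemma mem_pvCells {x : Nat × Nat} (h : x ∈ pvCells) : x.1 < 4 ∧ x.2 < 4 := by
  fin_cases h <;> decide

lemma pvCells_mem {i j : Nat} (hi : i < 4) (hj : j < 4) : (i, j) ∈ pvCells := by
  interval_cases i <;> interval_cases j <;> decide

lemma nested_any (q : Nat → Nat → Bool) :
    ((List.range 4).any (fun i => (List.range 4).any (fun j => q i j)) = true) ↔
      ∃ x ∈ pvCells, q x.1 x.2 = true := by
  simp only [List.any_eq_true, List.mem_range]
  constructor
  · rintro ⟨i, hi, j, hj, h⟩
    exact ⟨(i, j), pvCells_mem hi hj, h⟩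
  · rintro ⟨x, hx, h⟩
    exact ⟨x.1, (mem_pvCells hx).1, x.2, (mem_pvCells hx).2, h⟩

lemma coll_iff (field piece : List (List Int)) (p left : Int) :
    (checkCollision field piece [p, left] = true) ↔
      ∃ x ∈ pvCells, ((piece.getD x.1 []).getD x.2 0 ≠ 0) ∧ bad field left x.1 x.2 p = true := by
  rw [show checkCollision field piece [p, left]
      = (List.range 4).any (fun i => (List.range 4).any (fun j =>
          (((piece.getD i []).getD j 0 != 0) && bad field left i j p))) from rfl,
    nested_any]
  simp [Bool.and_eq_true, bne_iff_ne]

-- generic fold computing the minimum of g over elements satisfying f (Source B's 'stop' loop shape)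
lemma foldl_optmin {α : Type} (g : α → Int) (f : α → Bool) :
    ∀ (l : List α) (s0 : Option Int),
      (l.foldl (fun s x => if f x then
          (match s with
           | none => some (g x)
           | some q => some (if g x < q then g x else q))
        else s) s0 = none ↔ (s0 = none ∧ ∀ x ∈ l, f x = false)) ∧
      (∀ v, l.foldl (fun s x => if f x then
          (match s with
           | none => some (g x)
           | some q => some (if g x < q then g x else q))
        else s) s0 = some v →
        ((s0 = some v ∨ ∃ x ∈ l, f x = true ∧ g x = v) ∧
         (∀ x ∈ l, f x = true → v ≤ g x) ∧
         (∀ w, s0 = some w → v ≤ w))) := by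
  intro l
  induction l with
  | nil =>
    intro s0
    refine ⟨by simp, ?_⟩
    intro v hv
    simp only [List.foldl_nil] at hv
    refine ⟨Or.inl hv, by simp, fun w hw => ?_⟩
    rw [hv] at hw; injection hw with h; omega
  | cons x t ih =>
    intro s0
    by_cases hf : f x = true
    · cases s0 with
      | none =>
        obtain ⟨ihn, ihs⟩ := ih (some (g x))
        rw [List.foldl_cons]
        simp only [hf, if_true]
        constructor
        · constructor
          · intro h; exact absurd (ihn.mp h).1 (Option.some_ne_none _)
          · rintro ⟨-, h2⟩; exact absurd (h2 x List.mem_cons_self) (by simp [hf])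
        · intro v hv
          obtain ⟨hach, hmin, hinit⟩ := ihs v hv
          refine ⟨?_, ?_, ?_⟩
          · rcases hach with h | ⟨y, hy, hfy, hgy⟩
            · injection h with h
              exact Or.inr ⟨x, List.mem_cons_self, hf, h⟩
            · exact Or.inr ⟨y, List.mem_cons_of_mem _ hy, hfy, hgy⟩
          · intro y hy hfy
            rcases List.mem_cons.mp hy with rfl | hy'
            · exact hinit (g y) rfl
            · exact hmin y hy' hfy
          · intro w hw; cases hw
      | some q =>
        obtain ⟨ihn, ihs⟩ := ih (some (if g x < q then g x else q))
        rw [List.foldl_cons]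
        simp only [hf, if_true]
        constructor
        · constructor
          · intro h; exact absurd (ihn.mp h).1 (Option.some_ne_none _)
          · rintro ⟨h, -⟩; exact absurd h (Option.some_ne_none _)
        · intro v hv
          obtain ⟨hach, hmin, hinit⟩ := ihs v hv
          have hvm : v ≤ if g x < q then g x else q := hinit _ rfl
          refine ⟨?_, ?_, ?_⟩
          · rcases hach with h | ⟨y, hy, hfy, hgy⟩
            · injection h with h
              by_cases hlt : g x < q
              · exact Or.inr ⟨x, List.mem_cons_self, hf, by simp [hlt] at h; omega⟩
              · refine Or.inl ?_
                simp only [hlt, if_false] at h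
                rw [h]
            · exact Or.inr ⟨y, List.mem_cons_of_mem _ hy, hfy, hgy⟩
          · intro y hy hfy
            rcases List.mem_cons.mp hy with rfl | hy'
            · by_cases hlt : g y < q <;> simp [hlt] at hvm <;> omega
            · exact hmin y hy' hfy
          · intro w hw
            injection hw with hw
            by_cases hlt : g x < q <;> simp [hlt] at hvm <;> omega
    · have hf' : f x = false := by simpa using hf
      rw [List.foldl_cons]
      simp only [hf', Bool.false_eq_true, if_false]
      obtain ⟨ihn, ihs⟩ := ih s0
      constructor
      · rw [ihn]
        constructor
        · rintro ⟨h1, h2⟩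
          refine ⟨h1, ?_⟩
          intro y hy
          rcases List.mem_cons.mp hy with rfl | hy'
          · exact hf'
          · exact h2 y hy'
        · rintro ⟨h1, h2⟩
          exact ⟨h1, fun y hy => h2 y (List.mem_cons_of_mem _ hy)⟩
      · intro v hv
        obtain ⟨hach, hmin, hinit⟩ := ihs v hv
        refine ⟨?_, ?_, hinit⟩
        · rcases hach with h | ⟨y, hy, hfy, hgy⟩
          · exact Or.inl h
          · exact Or.inr ⟨y, List.mem_cons_of_mem _ hy, hfy, hgy⟩
        · intro y hy hfy
          rcases List.mem_cons.mp hy with rfl | hy'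
          · exact absurd hfy hf
          · exact hmin y hy' hfy

-- colFirst finds the first p' ≥ p with i+p' ≥ H or field[i+p'][c] ≠ 0, given enough fuel
lemma colFirst_spec (field : List (List Int)) (i : Nat) (c : Int) :
    ∀ (fuel : Nat) (p : Int), (field.length : Int) ≤ (i : Int) + p + fuel →
      p ≤ colFirst field i c p fuel ∧
      colFirst field i c p fuel ≤ p + fuel ∧
      (¬ ((i : Int) + colFirst field i c p fuel < (field.length : Int)) ∨
        (field.getD ((i : Int) + colFirst field i c p fuel).toNat []).getD c.toNat 0 ≠ 0) ∧
      (∀ q, p ≤ q → q < colFirst field i c p fuel →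
        ((i : Int) + q < (field.length : Int) ∧
         (field.getD ((i : Int) + q).toNat []).getD c.toNat 0 = 0)) := by
  intro fuel
  induction fuel with
  | zero =>
    intro p hp
    refine ⟨le_refl _, by simp [colFirst], ?_, ?_⟩
    · simp only [colFirst]; left; omega
    · intro q h1 h2; simp only [colFirst] at h2; omega
  | succ n ih =>
    intro p hp
    by_cases hcond : ((i : Int) + p < (field.length : Int)) ∧ (field.getD ((i : Int) + p).toNat []).getD c.toNat 0 = 0
    · have hstep : colFirst field i c p (n + 1) = colFirst field i c (p + 1) n := by
        simp only [colFirst]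
        rw [if_pos]
        simp only [Bool.and_eq_true, decide_eq_true_eq, beq_iff_eq]
        exact ⟨hcond.1, hcond.2⟩
      obtain ⟨h1, h2, h3, h4⟩ := ih (p + 1) (by push_cast at hp ⊢; omega)
      rw [hstep]
      refine ⟨by omega, by push_cast at h2 ⊢; omega, h3, ?_⟩
      intro q hq1 hq2
      rcases eq_or_lt_of_le hq1 with rfl | hq1'
      · exact hcond
      · exact h4 q (by omega) hq2
    · have hstep : colFirst field i c p (n + 1) = p := by
        simp only [colFirst]
        rw [if_neg]
        simp only [Bool.and_eq_true, decide_eq_true_eq, beq_iff_eq]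
        exact hcond
      rw [hstep]
      refine ⟨le_refl _, by omega, ?_, ?_⟩
      · by_cases h : (i : Int) + p < (field.length : Int)
        · exact Or.inr (fun hz => hcond ⟨h, hz⟩)
        · exact Or.inl h
      · intro q h1 h2; omega

-- per-cell spec of cellDrop: first colliding position ≥ start for cell (i,j), and a bound for fuel arithmetic
lemma cellDrop_spec (field : List (List Int)) (start left : Int) (i j : Nat) :
    start ≤ cellDrop field start left i j ∧
    (cellDrop field start left i j = start ∨ cellDrop field start left i j ≤ (field.length : Int)) ∧
    bad field left i j (cellDrop field start left i j) = true ∧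
    (∀ q, start ≤ q → q < cellDrop field start left i j → bad field left i j q = false) := by
  by_cases hg : (decide (((j : Int) + left) < 0) || decide (((j : Int) + left) ≥ ((field.getD 0 []).length : Int)) || decide ((i : Int) + start < 0)) = true
  · have hcd : cellDrop field start left i j = start := by
      simp only [cellDrop]; rw [if_pos hg]
    rw [hcd]
    refine ⟨le_refl _, Or.inl rfl, ?_, ?_⟩
    · simp only [Bool.or_eq_true, decide_eq_true_eq] at hg
      simp only [bad, Bool.or_eq_true, decide_eq_true_eq]
      rcases hg with (h | h) | h
      · exact Or.inl (Or.inr h)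
      · exact Or.inl (Or.inl (Or.inl (Or.inr h)))
      · exact Or.inl (Or.inl (Or.inr h))
    · intro q h1 h2; omega
  · simp only [Bool.or_eq_true, decide_eq_true_eq, not_or, not_lt, not_le] at hg
    obtain ⟨⟨hc0, hcW⟩, his⟩ := hg
    have hcd : cellDrop field start left i j
        = colFirst field i ((j : Int) + left) start (((field.length : Int) - ((i : Int) + start)).toNat) := by
      simp only [cellDrop]
      rw [if_neg]
      simp only [Bool.or_eq_true, decide_eq_true_eq, not_or, not_lt, not_le]
      exact ⟨⟨hc0, hcW⟩, his⟩
    obtain ⟨h1, h2, h3, h4⟩ := colFirst_spec field i ((j : Int) + left)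
      (((field.length : Int) - ((i : Int) + start)).toNat) start (by omega)
    rw [hcd]
    refine ⟨h1, by omega, ?_, ?_⟩
    · simp only [bad, Bool.or_eq_true, decide_eq_true_eq, bne_iff_ne, ne_eq]
      rcases h3 with h | h
      · exact Or.inl (Or.inl (Or.inl (Or.inl (by omega))))
      · exact Or.inr h
    · intro q hq1 hq2
      obtain ⟨hqH, hq0⟩ := h4 q hq1 hq2
      simp only [bad, Bool.or_eq_false_iff, decide_eq_false_iff_not, not_lt, not_le,
        bne_eq_false_iff_eq]
      refine ⟨⟨⟨⟨by omega, by omega⟩, by omega⟩, by omega⟩, hq0⟩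

-- the fueled while-loop returns the first colliding position, given enough fuel
lemma landLoop_eq (field piece : List (List Int)) (left s : Int)
    (hs : checkCollision field piece [s, left] = true) :
    ∀ (fuel : Nat) (p : Int), p ≤ s → ((s - p).toNat < fuel) →
      (∀ q, p ≤ q → q < s → checkCollision field piece [q, left] = false) →
      landLoop field piece left p fuel = s := by
  intro fuel
  induction fuel with
  | zero => intro p h1 h2; omega
  | succ n ih =>
    intro p h1 h2 h3
    by_cases hc : checkCollision field piece [p, left] = true
    · have hps : p = s := by
        rcases eq_or_lt_of_le h1 with rfl | hlt
        · rfl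
        · exact absurd hc (by rw [h3 p (le_refl _) hlt]; simp)
      subst hps
      simp [landLoop, hc]
    · have hps : p < s := by
        rcases eq_or_lt_of_le h1 with rfl | hlt
        · exact absurd hs hc
        · exact hlt
      simp only [landLoop]
      rw [if_neg hc]
      exact ih (p + 1) (by omega) (by omega) (fun q hq1 hq2 => h3 q (by omega) hq2)


-- Source B's 'stop' loop without the early exit (a plain running minimum over the cell list)
def stopv (field piece : List (List Int)) (start left : Int) : Option Int :=
  pvCells.foldl (fun s x =>
    if (piece.getD x.1 []).getD x.2 0 != 0 then
      match s with
      | none => some (cellDrop field start left x.1 x.2)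
      | some q => some (if cellDrop field start left x.1 x.2 < q then cellDrop field start left x.1 x.2 else q)
    else s) none

-- once the running minimum reaches start it never changes (every cellDrop is ≥ start)
lemma foldl_min_stable (field piece : List (List Int)) (start left : Int) :
    ∀ (l : List (Nat × Nat)),
      l.foldl (fun s x =>
        if (piece.getD x.1 []).getD x.2 0 != 0 then
          match s with
          | none => some (cellDrop field start left x.1 x.2)
          | some q => some (if cellDrop field start left x.1 x.2 < q then cellDrop field start left x.1 x.2 else q)
        else s) (some start) = some start := by
  intro l
  induction l with
  | nil => rfl
  | cons x t ih =>
    rw [List.foldl_cons]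
    by_cases hf : ((piece.getD x.1 []).getD x.2 0 != 0) = true
    · simp only [hf, if_true]
      have h1 := (cellDrop_spec field start left x.1 x.2).1
      have : (if cellDrop field start left x.1 x.2 < start then cellDrop field start left x.1 x.2 else start) = start := by
        rw [if_neg]; omega
      rw [this]
      exact ih
    · have hf' : ((piece.getD x.1 []).getD x.2 0 != 0) = false := by simpa using hf
      simp only [hf', Bool.false_eq_true, if_false]
      exact ih

-- the early exit of _first_stop does not change the computed minimum
lemma stopScan_eq_foldl (field piece : List (List Int)) (start left : Int) :
    ∀ (l : List (Nat × Nat)) (s0 : Option Int),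
      stopScan field piece start left l s0 =
        l.foldl (fun s x =>
          if (piece.getD x.1 []).getD x.2 0 != 0 then
            match s with
            | none => some (cellDrop field start left x.1 x.2)
            | some q => some (if cellDrop field start left x.1 x.2 < q then cellDrop field start left x.1 x.2 else q)
          else s) s0 := by
  intro l
  induction l with
  | nil => intro s0; rfl
  | cons x t ih =>
    intro s0
    rw [List.foldl_cons]
    by_cases hf : ((piece.getD x.1 []).getD x.2 0 != 0) = true
    · simp only [stopScan, hf, if_true]
      set s' : Option Int := (match s0 with
        | none => some (cellDrop field start left x.1 x.2)
        | some q => some (if cellDrop field start left x.1 x.2 < q then cellDrop field start left x.1 x.2 else q)) with hs'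
      by_cases hx : s' = some start
      · rw [if_pos hx, hx, foldl_min_stable]
      · rw [if_neg hx]
        exact ih s'
    · have hf' : ((piece.getD x.1 []).getD x.2 0 != 0) = false := by simpa using hf
      simp only [stopScan, hf', Bool.false_eq_true, if_false]
      exact ih s0

lemma land_alt_eq (field piece : List (List Int)) (pos_now : List Int) :
    land_alt field piece pos_now =
      (match stopv field piece (pos_now.getD 0 0) (pos_now.getD 1 0) with
       | none => none
       | some st =>
         if st = 0 then none
         else some ((List.range 4).foldl (fun acc (i : Nat) => (List.range 4).foldl (fun acc (j : Nat) =>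
           if decide ((i : Int) + (st - 1) < (field.length : Int)) && decide ((j : Int) + pos_now.getD 1 0 < ((field.getD 0 []).length : Int))
           then bump acc ((i : Int) + (st - 1)) ((j : Int) + pos_now.getD 1 0) ((piece.getD i []).getD j 0)
           else acc) acc) field)) := by
  show (match stopScan field piece (pos_now.getD 0 0) (pos_now.getD 1 0) pvCells none with
        | none => none
        | some st =>
          if st = 0 then none
          else some ((List.range 4).foldl (fun acc (i : Nat) => (List.range 4).foldl (fun acc (j : Nat) =>
            if decide ((i : Int) + (st - 1) < (field.length : Int)) && decide ((j : Int) + pos_now.getD 1 0 < ((field.getD 0 []).length : Int))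
            then bump acc ((i : Int) + (st - 1)) ((j : Int) + pos_now.getD 1 0) ((piece.getD i []).getD j 0)
            else acc) acc) field)) = _
  rw [stopScan_eq_foldl]
  rfl

-- ===== VERDICT (by name: the statement is the Claim_ definition above) =====
theorem land_spec : Claim_equal_land := by
  intro field piece pos_now _ hpre
  obtain ⟨hlen2, hne, hfill, hreg⟩ := hpre
  unfold Spec_land
  obtain ⟨hnone, hsome⟩ := foldl_optmin
    (fun x : Nat × Nat => cellDrop field (pos_now.getD 0 0) (pos_now.getD 1 0) x.1 x.2)
    (fun x : Nat × Nat => (piece.getD x.1 []).getD x.2 0 != 0) pvCells none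
  cases hstop : stopv field piece (pos_now.getD 0 0) (pos_now.getD 1 0) with
  | none =>
    exfalso
    obtain ⟨x0, hx0, hf0⟩ := hfill
    have hall := (hnone.mp hstop).2 x0 hx0
    simp only [bne_eq_false_iff_eq] at hall
    exact hf0 hall
  | some s =>
    obtain ⟨hach, hmin, -⟩ := hsome s hstop
    rcases hach with h | ⟨x0, hx0, hfx0, hgx0⟩
    · cases h
    obtain ⟨hcd1, hcd2, hcd3, hcd4⟩ :=
      cellDrop_spec field (pos_now.getD 0 0) (pos_now.getD 1 0) x0.1 x0.2
    have hs_start : pos_now.getD 0 0 ≤ s := hgx0 ▸ hcd1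
    have hsb : s = pos_now.getD 0 0 ∨ s ≤ (field.length : Int) := hgx0 ▸ hcd2
    have hcoll : checkCollision field piece [s, pos_now.getD 1 0] = true :=
      (coll_iff field piece s (pos_now.getD 1 0)).mpr
        ⟨x0, hx0, by simpa using hfx0, hgx0 ▸ hcd3⟩
    have hnc : ∀ q, pos_now.getD 0 0 ≤ q → q < s →
        checkCollision field piece [q, pos_now.getD 1 0] = false := by
      intro q h1 h2
      by_contra hq
      rw [Bool.not_eq_false] at hq
      obtain ⟨y, hy, hfy, hby⟩ := (coll_iff field piece q (pos_now.getD 1 0)).mp hq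
      have hys : s ≤ cellDrop field (pos_now.getD 0 0) (pos_now.getD 1 0) y.1 y.2 :=
        hmin y hy (by simpa using hfy)
      have hbf := (cellDrop_spec field (pos_now.getD 0 0) (pos_now.getD 1 0) y.1 y.2).2.2.2
        q h1 (by omega)
      rw [hbf] at hby
      cases hby
    have hloop : landLoop field piece (pos_now.getD 1 0) (pos_now.getD 0 0)
        (((field.length : Int) + 1 - pos_now.getD 0 0).toNat + 1) = s :=
      landLoop_eq field piece (pos_now.getD 1 0) s hcoll _ (pos_now.getD 0 0) hs_start
        (by omega) hnc
    rw [land_alt_eq, hstop]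
    simp only [land]
    rw [hloop]
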